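-- pv_equiv track=rewrite | github.com/CCMS-UCSD/hpp_inspector | peptide_statistics_hpp_tools/quantlib/mztab.py | peptide_string
-- ===== SOURCE A (Python) =====
-- def peptide_string(sequence,modifications):
--     if modifications == "null":
--         return sequence
--     else:
--         new_sequence = sequence.split()
--         mods = dict([
--                 (int(mod.split("-")[0]),find_mod(mod.split("-")[1]))
--                 for mod in modifications.split(",")
--                 if find_mod(mod.split("-")[1]) != None
--             ])
--         new_sequence = []
--         for (i,s) in enumerate(sequence):
--             new_sequence.append(s)
--             new_sequence.append(mods.get(i+1,""))
--         return "".join(new_sequence)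
--
-- def find_mod(modification):
--     convert = {
--         'UNIMOD:1':'+42.010565',
--         'UNIMOD:4':'+57.021464',
--         'UNIMOD:5':'+43.005814',
--         'UNIMOD:6':'+58.005479',
--         'UNIMOD:7':'+0.984016',
--         'UNIMOD:17':'+99.068414',
--         'UNIMOD:21':'+79.966331',
--         'UNIMOD:28':'-17.026549',
--         'UNIMOD:34':'+14.015650',
--         'UNIMOD:35':'+15.994915'
--     }
--     if 'UNIMOD' in modification:
--         return convert.get(modification)
--     else:
--         return modification.split(":")[1]
-- ===== SOURCE B (Python) =====
-- def find_mod(modification):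
--     convert = {
--         'UNIMOD:1':'+42.010565',
--         'UNIMOD:4':'+57.021464',
--         'UNIMOD:5':'+43.005814',
--         'UNIMOD:6':'+58.005479',
--         'UNIMOD:7':'+0.984016',
--         'UNIMOD:17':'+99.068414',
--         'UNIMOD:21':'+79.966331',
--         'UNIMOD:28':'-17.026549',
--         'UNIMOD:34':'+14.015650',
--         'UNIMOD:35':'+15.994915'
--     }
--     if 'UNIMOD' in modification:
--         return convert.get(modification)
--     else:
--         return modification.split(":")[1]
--
-- def peptide_string(sequence, modifications):
--     if modifications == "null":
--         return sequence
--     mods = {}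
--     for mod in modifications.split(","):
--         parts = mod.split("-")
--         m = find_mod(parts[1])
--         if m is not None:
--             mods[int(parts[0])] = m
--     n = len(sequence)
--     out = []
--     prev = 0
--     for p in sorted(mods):
--         if 1 <= p <= n:
--             out.append(sequence[prev:p])
--             out.append(mods[p])
--             prev = p
--     out.append(sequence[prev:])
--     return "".join(out)
-- ===== Notes on version B (the rewrite author's own statement) =====
-- stated objective: simpler
-- what changed: The per-character loop that appends every residue plus a (usually empty) dict lookup is replaced by a cursor-based splice: iterate only over the sorted modification positions, appending sequence slices between them, so the output is built from O(m) parts instead of 2n list appends.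
import Mathlib
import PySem

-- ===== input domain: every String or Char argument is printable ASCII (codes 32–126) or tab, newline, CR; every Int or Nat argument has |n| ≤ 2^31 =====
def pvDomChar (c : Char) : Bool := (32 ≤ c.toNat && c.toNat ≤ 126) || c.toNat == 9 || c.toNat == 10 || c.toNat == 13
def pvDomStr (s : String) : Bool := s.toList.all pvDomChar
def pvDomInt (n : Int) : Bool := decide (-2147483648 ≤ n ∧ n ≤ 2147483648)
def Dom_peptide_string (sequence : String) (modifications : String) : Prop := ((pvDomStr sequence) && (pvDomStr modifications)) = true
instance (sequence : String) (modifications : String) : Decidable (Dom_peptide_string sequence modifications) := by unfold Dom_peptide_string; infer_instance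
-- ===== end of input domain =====

-- B replaces A's per-character loop (append char + dict-get for every residue) by a cursor splice over
-- the sorted modification positions only; the dict-building phase is shared. Objective: simpler assembly.

-- ===== PORT A =====
-- the 'convert' table of find_mod
def pvConvert : PySem.Dict String String := PySem.Dict.ofList
  [("UNIMOD:1", "+42.010565"), ("UNIMOD:4", "+57.021464"), ("UNIMOD:5", "+43.005814"),
   ("UNIMOD:6", "+58.005479"), ("UNIMOD:7", "+0.984016"), ("UNIMOD:17", "+99.068414"),
   ("UNIMOD:21", "+79.966331"), ("UNIMOD:28", "-17.026549"), ("UNIMOD:34", "+14.015650"),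
   ("UNIMOD:35", "+15.994915")]

-- find_mod; outer none = the IndexError of modification.split(":")[1], inner Option = Python's None
def find_mod (modification : String) : Option (Option String) :=
  if PySem.Str.isIn "UNIMOD" modification then some (pvConvert.get? modification)
  else (PySem.List.pyGet? ((PySem.Str.split? modification ":").getD []) 1).map some

-- one comprehension element: (int(mod.split("-")[0]), find_mod(mod.split("-")[1])) guarded by the filter;
-- outer none = raise (IndexError/ValueError), some none = filtered out
def modPair? (m : String) : Option (Option (Int × String)) :=
  match PySem.List.pyGet? ((PySem.Str.split? m "-").getD []) 1 with
  | none => none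
  | some p1 =>
    match find_mod p1 with
    | none => none
    | some none => some none
    | some (some v) =>
      match PySem.List.pyGet? ((PySem.Str.split? m "-").getD []) 0 with
      | none => none
      | some p0 => (PySem.Int.ofStr? p0).map (fun k => (k, v))

-- the list comprehension building the pair list for dict(...)
def pvPairsA : List String → Option (List (Int × String))
  | [] => some []
  | m :: rest =>
    match modPair? m, pvPairsA rest with
    | some none, some t => some t
    | some (some p), some t => some (p :: t)
    | _, _ => none

def peptide_string (sequence : String) (modifications : String) : String :=
  if modifications == "null" then sequence
  else
    match pvPairsA ((PySem.Str.split? modifications ",").getD []) with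
    | none => ""  -- Python raises here; excluded by Pre_peptide_string
    | some prs =>
      let mods := PySem.Dict.ofList prs
      let parts := (PySem.List.enumerate sequence.toList).foldl
        (fun acc p => acc ++ [String.ofList [p.2], mods.getD (p.1 + 1) ""]) []
      PySem.Str.join "" parts

-- ===== PORT B =====
-- B's dict-building loop: for mod in …: parts = mod.split("-"); m = find_mod(parts[1]); if m is not None: mods[int(parts[0])] = m
def pvBuildB : List String → PySem.Dict Int String → Option (PySem.Dict Int String)
  | [], d => some d
  | m :: rest, d =>
    match modPair? m with
    | none => none
    | some none => pvBuildB rest d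
    | some (some p) => pvBuildB rest (d.insert p.1 p.2)

-- B's cursor splice: for p in sorted(mods): if 1 <= p <= n: out += [sequence[prev:p], mods[p]]; prev = p
def pvSpliceB (sequence : String) (mods : PySem.Dict Int String) :
    List Int → Int → List String → List String
  | [], prev, out => out ++ [PySem.Str.slice sequence (some prev) none]
  | p :: ks, prev, out =>
    if 1 ≤ p ∧ p ≤ (PySem.Str.len sequence : Int) then
      pvSpliceB sequence mods ks p (out ++ [PySem.Str.slice sequence (some prev) (some p), mods.getD p ""])
    else pvSpliceB sequence mods ks prev out

def peptide_string_alt (sequence : String) (modifications : String) : String :=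
  if modifications == "null" then sequence
  else
    match pvBuildB ((PySem.Str.split? modifications ",").getD []) PySem.Dict.empty with
    | none => ""  -- Python raises here; excluded by Pre_peptide_string
    | some mods =>
      PySem.Str.join "" (pvSpliceB sequence mods (PySem.List.sorted mods.keys (fun x => x) false) 0 [])

-- ===== PRECONDITION & SPEC =====
-- Pre_ excludes exactly the inputs where A raises: a modification entry without "-" (IndexError),
-- a kept entry whose non-UNIMOD part has no ":" (IndexError), or a kept entry whose position part
-- int() cannot parse (ValueError).
def Pre_peptide_string (sequence : String) (modifications : String) : Prop :=
  modifications = "null" ∨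
  ∀ m ∈ (PySem.Str.split? modifications ",").getD [],
    2 ≤ ((PySem.Str.split? m "-").getD []).length ∧
    (PySem.Str.isIn "UNIMOD" (((PySem.Str.split? m "-").getD []).getD 1 "") = true ∨
      2 ≤ ((PySem.Str.split? (((PySem.Str.split? m "-").getD []).getD 1 "") ":").getD []).length) ∧
    ((PySem.Str.isIn "UNIMOD" (((PySem.Str.split? m "-").getD []).getD 1 "") = true →
        (pvConvert.get? (((PySem.Str.split? m "-").getD []).getD 1 "")).isSome = true) →
      (PySem.Int.ofStr? (((PySem.Str.split? m "-").getD []).getD 0 "")).isSome = true)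
instance (sequence : String) (modifications : String) : Decidable (Pre_peptide_string sequence modifications) := by
  unfold Pre_peptide_string; infer_instance

def pvWitness_peptide_string : String × String := ("PEPTIDE", "2-UNIMOD:4,4-XX:+3.0,9-UNIMOD:35,2-UNIMOD:999")

def Spec_peptide_string (sequence : String) (modifications : String) (out : String) : Prop := out = peptide_string_alt sequence modifications
instance (sequence : String) (modifications : String) (out : String) : Decidable (Spec_peptide_string sequence modifications out) := by unfold Spec_peptide_string; infer_instance

-- ===== CLAIM (what is proved, stated in full; the proofs are below) =====
def Claim_equal_peptide_string : Prop := ∀ (sequence : String) (modifications : String), Dom_peptide_string sequence modifications → Pre_peptide_string sequence modifications → Spec_peptide_string sequence modifications (peptide_string sequence modifications)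

-- ===== LEMMAS AND PROOFS =====


-- interleaved canonical form of the output: each character followed by its (possibly empty) mod string
def pvInterl (d : PySem.Dict Int String) : List Char → Int → List Char
  | [], _ => []
  | c :: t, i => c :: ((d.getD (i + 1) "").toList ++ pvInterl d t (i + 1))

theorem pv_join_toList (l : List String) :
    (PySem.Str.join "" l).toList = (l.map String.toList).flatten := by
  rw [PySem.Str.toList_join]
  show PySem.Chars.join [] _ = _
  simp only [PySem.Chars.join, List.intercalate]
  induction (l.map String.toList) with
  | nil => rfl
  | cons a t ih => cases t with
    | nil => rfl
    | cons b t' => simpa [List.intersperse] using ih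

theorem pv_A_interl (d : PySem.Dict Int String) (cs : List Char) (i : Int) :
    (((PySem.List.enumerate cs i).flatMap
        (fun p => [String.ofList [p.2], d.getD (p.1 + 1) ""])).map String.toList).flatten
      = pvInterl d cs i := by
  induction cs generalizing i with
  | nil => rfl
  | cons c t ih => simp [PySem.List.enumerate, pvInterl, ih]

theorem pv_splice_acc (s : String) (d : PySem.Dict Int String) (ks : List Int)
    (prev : Int) (out : List String) :
    pvSpliceB s d ks prev out = out ++ pvSpliceB s d ks prev [] := by
  induction ks generalizing prev out with
  | nil => simp [pvSpliceB]
  | cons p t ih =>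
    by_cases h : 1 ≤ p ∧ p ≤ (PySem.Str.len s : Int)
    · rw [pvSpliceB, pvSpliceB, if_pos h, if_pos h,
        ih p (out ++ [PySem.Str.slice s (some prev) (some p), d.getD p ""]),
        ih p ([] ++ [PySem.Str.slice s (some prev) (some p), d.getD p ""])]
      simp
    · rw [pvSpliceB, pvSpliceB, if_neg h, if_neg h]
      exact ih prev out

theorem pv_interl_empty (d : PySem.Dict Int String) (t : List Char) (i : Int)
    (h : ∀ j : Int, i < j → j ≤ i + t.length → d.getD j "" = "") :
    pvInterl d t i = t := by
  induction t generalizing i with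
  | nil => rfl
  | cons c t ih =>
    have h1 : d.getD (i + 1) "" = "" := h (i + 1) (by omega) (by simp only [List.length_cons]; push_cast; omega)
    rw [pvInterl, h1]
    simp only [String.toList_empty, List.nil_append]
    rw [ih (i + 1) (fun j hj1 hj2 => h j (by omega) (by simp only [List.length_cons] at hj2 ⊢; push_cast at hj2 ⊢; omega))]

theorem pv_interl_seg (d : PySem.Dict Int String) (t : List Char) (i : Int)
    (hne : t ≠ [])
    (h : ∀ j : Int, i < j → j < i + t.length → d.getD j "" = "") :
    pvInterl d t i = t ++ (d.getD (i + t.length) "").toList := by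
  induction t generalizing i with
  | nil => exact absurd rfl hne
  | cons c t ih =>
    cases t with
    | nil => simp [pvInterl]
    | cons b t' =>
      have h1 : d.getD (i + 1) "" = "" := h (i + 1) (by omega) (by simp only [List.length_cons]; push_cast; omega)
      rw [pvInterl, h1]
      simp only [String.toList_empty, List.nil_append]
      rw [ih (i + 1) (by simp) (fun j hj1 hj2 => h j (by omega) (by simp only [List.length_cons] at hj2 ⊢; push_cast at hj2 ⊢; omega))]
      have harith : i + 1 + ((t'.length : Int) + 1) = i + ((t'.length : Int) + 1 + 1) := by ring
      simp only [List.length_cons]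
      push_cast
      rw [harith]
      simp


theorem pv_interl_append (d : PySem.Dict Int String) (t1 t2 : List Char) (i : Int) :
    pvInterl d (t1 ++ t2) i = pvInterl d t1 i ++ pvInterl d t2 (i + t1.length) := by
  induction t1 generalizing i with
  | nil => simp [pvInterl]
  | cons c t ih =>
    simp only [List.cons_append, pvInterl, ih (i + 1), List.length_cons]
    push_cast
    have : i + 1 + (t.length : Int) = i + ((t.length : Int) + 1) := by ring
    rw [this]
    simp

theorem pv_splice_interl (s : String) (d : PySem.Dict Int String) (ks : List Int)
    (prev : Int) (h0 : 0 ≤ prev) (hn : prev ≤ (s.toList.length : Int))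
    (hs : ks.Pairwise (· < ·))
    (hI : ∀ k ∈ ks, prev < k ∨ k < 1)
    (hH : ∀ j : Int, prev < j → j ≤ (s.toList.length : Int) → j ∉ ks → d.getD j "" = "") :
    ((pvSpliceB s d ks prev []).map String.toList).flatten
      = pvInterl d (s.toList.drop prev.toNat) prev := by
  induction ks generalizing prev with
  | nil =>
    simp only [pvSpliceB, List.nil_append, List.map_cons, List.map_nil, List.flatten]
    rw [PySem.Str.toList_slice]
    simp only [PySem.Chars.slice_eq_listSlice]
    rw [PySem.List.slice_from _ h0]
    rw [pv_interl_empty d _ prev (fun j hj1 hj2 => hH j hj1 (by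
      simp only [List.length_drop] at hj2; omega) (by simp))]
    simp
  | cons p ks ih =>
    by_cases hp : 1 ≤ p ∧ p ≤ (PySem.Str.len s : Int)
    · have hp' := hp
      rw [PySem.Str.len_eq] at hp'
      obtain ⟨hp1, hp2⟩ := hp'
      have hprevp : prev < p := by
        rcases hI p List.mem_cons_self with h | h
        · exact h
        · omega
      have hks : ∀ k ∈ ks, p < k := (List.pairwise_cons.mp hs).1
      rw [pvSpliceB, if_pos hp, pv_splice_acc]
      simp only [List.nil_append, List.map_append, List.flatten_append, List.map_cons,
        List.map_nil, List.flatten_cons, List.flatten_nil]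
      rw [ih p (by omega) hp2 hs.tail
        (fun k hk => Or.inl (hks k hk))
        (fun j hj1 hj2 hj3 => hH j (by omega) hj2 (by
          simp only [List.mem_cons, not_or]
          exact ⟨by omega, hj3⟩))]
      -- decompose the remaining suffix at p
      have hdrop : s.toList.drop prev.toNat =
          (s.toList.drop prev.toNat).take (p.toNat - prev.toNat) ++ s.toList.drop p.toNat := by
        have : (s.toList.drop prev.toNat).drop (p.toNat - prev.toNat) = s.toList.drop p.toNat := by
          rw [List.drop_drop]
          congr 1
          omega
        conv_lhs => rw [← List.take_append_drop (p.toNat - prev.toNat) (s.toList.drop prev.toNat)]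
        rw [this]
      have hlen : ((s.toList.drop prev.toNat).take (p.toNat - prev.toNat)).length
          = p.toNat - prev.toNat := by
        simp only [List.length_take, List.length_drop]
        omega
      rw [hdrop, pv_interl_append, hlen]
      have hpos : prev + ((p.toNat - prev.toNat : Nat) : Int) = p := by omega
      rw [hpos]
      rw [pv_interl_seg d _ prev
        (by
          intro hnil
          have := congrArg List.length hnil
          simp only [hlen] at this
          simp at this
          omega)
        (by
          intro j hj1 hj2
          rw [hlen] at hj2
          refine hH j hj1 (by omega) ?_
          simp only [List.mem_cons, not_or]
          have hjp : j < p := by omega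
          exact ⟨by omega, fun hj => by have := hks j hj; omega⟩)]
      rw [hlen, hpos]
      -- the slice is exactly that segment
      have hslice : (PySem.Str.slice s (some prev) (some p)).toList
          = (s.toList.drop prev.toNat).take (p.toNat - prev.toNat) := by
        rw [PySem.Str.toList_slice]
        simp only [PySem.Chars.slice_eq_listSlice]
        rw [show prev = ((prev.toNat : Nat) : Int) by omega,
          show p = ((p.toNat : Nat) : Int) by omega,
          PySem.List.slice_natCast]
        simp
        congr 1
        · omega
        · congr 1
          omega
      simp [hslice]
    · rw [pvSpliceB, if_neg hp, ih prev h0 hn hs.tail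
        (fun k hk => hI k (List.mem_cons_of_mem p hk))]
      intro j hj1 hj2 hj3
      refine hH j hj1 hj2 ?_
      rw [PySem.Str.len_eq] at hp
      simp only [List.mem_cons, not_or]
      exact ⟨by omega, hj3⟩


theorem pv_pyGet_lt {α : Type} (l : List α) (k : Nat) (dflt : α) (h : k < l.length) :
    PySem.List.pyGet? l (k : Int) = some (l.getD k dflt) := by
  rw [PySem.List.pyGet?_natCast, List.getD_eq_getElem?_getD, List.getElem?_eq_getElem h]
  rfl

theorem pv_modPair_isSome (m : String)
    (h1 : 2 ≤ ((PySem.Str.split? m "-").getD []).length)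
    (h2 : PySem.Str.isIn "UNIMOD" (((PySem.Str.split? m "-").getD []).getD 1 "") = true ∨
      2 ≤ ((PySem.Str.split? (((PySem.Str.split? m "-").getD []).getD 1 "") ":").getD []).length)
    (h3 : (PySem.Str.isIn "UNIMOD" (((PySem.Str.split? m "-").getD []).getD 1 "") = true →
        (pvConvert.get? (((PySem.Str.split? m "-").getD []).getD 1 "")).isSome = true) →
      (PySem.Int.ofStr? (((PySem.Str.split? m "-").getD []).getD 0 "")).isSome = true) :
    ∃ r, modPair? m = some r := by
  have hget1 : PySem.List.pyGet? ((PySem.Str.split? m "-").getD []) (1 : Int)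
      = some (((PySem.Str.split? m "-").getD []).getD 1 "") := by
    have := pv_pyGet_lt ((PySem.Str.split? m "-").getD []) 1 "" (by omega)
    exact_mod_cast this
  have hget0 : PySem.List.pyGet? ((PySem.Str.split? m "-").getD []) (0 : Int)
      = some (((PySem.Str.split? m "-").getD []).getD 0 "") := by
    have := pv_pyGet_lt ((PySem.Str.split? m "-").getD []) 0 "" (by omega)
    exact_mod_cast this
  unfold modPair? find_mod
  simp only [hget1]
  by_cases hin : PySem.Str.isIn "UNIMOD" (((PySem.Str.split? m "-").getD []).getD 1 "") = true
  · simp only [if_pos hin]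
    cases hc : pvConvert.get? (((PySem.Str.split? m "-").getD []).getD 1 "") with
    | none => exact ⟨none, by dsimp only⟩
    | some v =>
      obtain ⟨k, hk⟩ := Option.isSome_iff_exists.mp (h3 (fun _ => by rw [hc]; rfl))
      simp only [hget0, hk]
      exact ⟨some (k, v), rfl⟩
  · simp only [if_neg hin]
    rcases h2 with h2 | h2
    · exact absurd h2 hin
    have hgetc : PySem.List.pyGet?
        ((PySem.Str.split? (((PySem.Str.split? m "-").getD []).getD 1 "") ":").getD []) (1 : Int)
        = some (((PySem.Str.split? (((PySem.Str.split? m "-").getD []).getD 1 "") ":").getD []).getD 1 "") := by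
      have := pv_pyGet_lt
        ((PySem.Str.split? (((PySem.Str.split? m "-").getD []).getD 1 "") ":").getD []) 1 "" (by omega)
      exact_mod_cast this
    obtain ⟨k, hk⟩ := Option.isSome_iff_exists.mp (h3 (fun hin' => absurd hin' hin))
    simp only [hgetc, Option.map_some, hget0, hk]
    exact ⟨some (k, _), rfl⟩

theorem pv_pairs_some (ms : List String)
    (h : ∀ m ∈ ms,
      2 ≤ ((PySem.Str.split? m "-").getD []).length ∧
      (PySem.Str.isIn "UNIMOD" (((PySem.Str.split? m "-").getD []).getD 1 "") = true ∨
        2 ≤ ((PySem.Str.split? (((PySem.Str.split? m "-").getD []).getD 1 "") ":").getD []).length) ∧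
      ((PySem.Str.isIn "UNIMOD" (((PySem.Str.split? m "-").getD []).getD 1 "") = true →
          (pvConvert.get? (((PySem.Str.split? m "-").getD []).getD 1 "")).isSome = true) →
        (PySem.Int.ofStr? (((PySem.Str.split? m "-").getD []).getD 0 "")).isSome = true)) :
    ∃ prs, pvPairsA ms = some prs := by
  induction ms with
  | nil => exact ⟨[], rfl⟩
  | cons m rest ih =>
    obtain ⟨h1, h2, h3⟩ := h m List.mem_cons_self
    obtain ⟨r, hr⟩ := pv_modPair_isSome m h1 h2 h3
    obtain ⟨t, ht⟩ := ih (fun m' hm' => h m' (List.mem_cons_of_mem m hm'))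
    cases r with
    | none => exact ⟨t, by rw [pvPairsA, hr, ht]⟩
    | some p => exact ⟨p :: t, by rw [pvPairsA, hr, ht]⟩

theorem pv_build_eq (ms : List String) (d : PySem.Dict Int String) :
    pvBuildB ms d = (pvPairsA ms).map (fun prs => d.update prs) := by
  induction ms generalizing d with
  | nil => simp [pvBuildB, pvPairsA, PySem.Dict.update]
  | cons m rest ih =>
    rw [pvBuildB, pvPairsA]
    cases hr : modPair? m with
    | none => cases hrest : pvPairsA rest <;> rfl
    | some r =>
      cases r with
      | none =>
        dsimp only
        rw [ih d]
        cases hrest : pvPairsA rest <;> rfl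
      | some p =>
        dsimp only
        rw [ih (d.insert p.1 p.2)]
        cases hrest : pvPairsA rest with
        | none => rfl
        | some t => simp [PySem.Dict.update]

theorem pv_main (s : String) (d : PySem.Dict Int String) (hnd : d.keys.Nodup) :
    PySem.Str.join "" ((PySem.List.enumerate s.toList).foldl
      (fun acc p => acc ++ [String.ofList [p.2], d.getD (p.1 + 1) ""]) []) =
    PySem.Str.join "" (pvSpliceB s d (PySem.List.sorted d.keys (fun x => x) false) 0 []) := by
  apply String.toList_inj.mp
  rw [pv_join_toList, pv_join_toList]
  have hflat := PySem.List.foldl_append_eq_flatMap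
    (fun p : Int × Char => [String.ofList [p.2], d.getD (p.1 + 1) ""])
    (PySem.List.enumerate s.toList) []
  rw [hflat]
  simp only [List.nil_append]
  rw [pv_A_interl]
  have hperm : (PySem.List.sorted d.keys (fun x => x) false).Perm d.keys :=
    PySem.List.sorted_perm d.keys (fun x => x) false
  have hnd2 : (PySem.List.sorted d.keys (fun x => x) false).Nodup := hperm.nodup_iff.mpr hnd
  have hsorted : (PySem.List.sorted d.keys (fun x => x) false).Pairwise (· < ·) :=
    ((PySem.List.sorted_pairwise d.keys (fun x => x)).and hnd2).imp
      (fun hab => lt_of_le_of_ne hab.1 hab.2)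
  rw [pv_splice_interl s d _ 0 le_rfl (by positivity) hsorted
    (fun k _ => by omega)
    (fun j _ _ hj3 => by
      have hjk : j ∉ d.keys := fun hk =>
        hj3 ((PySem.List.mem_sorted d.keys (fun x => x) false j).mpr hk)
      refine PySem.Dict.getD_of_not_contains d "" ?_
      rw [← Bool.not_eq_true, PySem.Dict.contains_iff_mem_keys]
      exact hjk)]
  simp

-- ===== VERDICT (by name: the statement is the Claim_ definition above) =====
theorem peptide_string_spec : Claim_equal_peptide_string := by
  intro sequence modifications _ hpre
  unfold Spec_peptide_string peptide_string peptide_string_alt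
  by_cases hnull : modifications = "null"
  · simp [hnull]
  · have hbeq : (modifications == "null") = false := by
      simpa using hnull
    rw [hbeq]
    simp only [Bool.false_eq_true, if_false]
    rcases hpre with h | hpre
    · exact absurd h hnull
    obtain ⟨prs, hprs⟩ := pv_pairs_some _ hpre
    rw [hprs, pv_build_eq, hprs]
    simp only [Option.map_some]
    have hup : PySem.Dict.empty.update prs = PySem.Dict.ofList prs := rfl
    rw [hup]
    exact pv_main sequence (PySem.Dict.ofList prs) (PySem.Dict.nodup_keys_ofList prs)
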